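-- pv_equiv track=rewrite | github.com/PR080T/MindEase | MentalHealthChatbot.py | detect_emotion_and_intensity
-- ===== SOURCE A (Python) =====
-- from typing import Dict, Optional, Tuple, Union, Any
--
-- def detect_emotion_and_intensity(user_query: str) -> Tuple[str, str, int]:
--     """
--     Detect emotion type, category, and intensity from user input.
--
--     Args:
--         user_query (str): User's input message
--
--     Returns:
--         tuple: (emotion_type, emotion_category, intensity_level)
--     """
--     user_query_lower = user_query.lower()
--
--     # Define emotion categories with intensity levels
--     emotions = {
--         'severe_negative': {
--             'keywords': ['suicidal', 'kill myself', 'end it all', 'want to die', 'no point living',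
--                         'hopeless', 'worthless', 'hate myself', 'can\'t go on', 'give up'],
--             'intensity': 5
--         },
--         'high_negative': {
--             'keywords': ['depressed', 'devastated', 'broken', 'shattered', 'destroyed',
--                         'overwhelmed', 'panic', 'terrified', 'desperate', 'miserable',
--                         'depression', 'feeling depressed', 'i am depressed', 'very sad',
--                         'deeply sad', 'extremely sad', 'can\'t cope', 'falling apart'],
--             'intensity': 4
--         },
--         'moderate_negative': {
--             'keywords': ['sad', 'anxious', 'worried', 'stressed', 'upset', 'frustrated',
--                         'angry', 'lonely', 'scared', 'nervous', 'tired', 'exhausted',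
--                         'cant sleep', 'can\'t sleep', 'cannot sleep', 'insomnia', 'sleepless',
--                         'cant fall asleep', 'can\'t fall asleep', 'cannot fall asleep',
--                         'trouble sleeping', 'difficulty sleeping', 'sleep problems',
--                         'restless night', 'tossing and turning', 'wide awake', 'sleepless night'],
--             'intensity': 3
--         },
--         'mild_negative': {
--             'keywords': ['concerned', 'bothered', 'uncomfortable', 'uneasy', 'restless',
--                         'irritated', 'disappointed', 'confused', 'uncertain'],
--             'intensity': 2
--         },
--         'neutral': {
--             'keywords': ['okay', 'fine', 'alright', 'normal', 'average', 'so-so'],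
--             'intensity': 1
--         },
--         'mild_positive': {
--             'keywords': ['good', 'better', 'nice', 'pleasant', 'content', 'calm', 'peaceful', 'okay today', 'doing well'],
--             'intensity': 2
--         },
--         'moderate_positive': {
--             'keywords': ['happy', 'glad', 'pleased', 'satisfied', 'cheerful', 'optimistic',
--                         'hopeful', 'confident', 'proud', 'feeling happy', 'i am happy', 'really happy'],
--             'intensity': 3
--         },
--         'high_positive': {
--             'keywords': ['great', 'wonderful', 'fantastic', 'amazing', 'excellent', 'thrilled',
--                         'excited', 'joyful', 'elated', 'grateful'],
--             'intensity': 4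
--         },
--         'euphoric': {
--             'keywords': ['ecstatic', 'overjoyed', 'blissful', 'euphoric', 'on top of the world',
--                         'never been better', 'incredible', 'phenomenal'],
--             'intensity': 5
--         }
--     }
--
--     detected_emotions = []
--
--     # Special handling for single word inputs - exact matches get priority
--     if len(user_query.strip().split()) == 1:
--         single_word = user_query_lower.strip()
--         for emotion_type, emotion_data in emotions.items():
--             if single_word in emotion_data['keywords']:
--                 detected_emotions.append((emotion_type, emotion_data['intensity']))
--
--     # Regular keyword matching for longer inputs or if no exact match found
--     if not detected_emotions:
--         for emotion_type, emotion_data in emotions.items():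
--             for keyword in emotion_data['keywords']:
--                 if keyword in user_query_lower:
--                     detected_emotions.append((emotion_type, emotion_data['intensity']))
--
--     if not detected_emotions:
--         return 'neutral', 'neutral', 1
--
--     # Return the most intense emotion detected
--     detected_emotions.sort(key=lambda x: x[1], reverse=True)
--     emotion_type = detected_emotions[0][0]
--     intensity = detected_emotions[0][1]
--
--     # Categorize emotions
--     if 'negative' in emotion_type:
--         category = 'negative'
--     elif 'positive' in emotion_type or emotion_type == 'euphoric':
--         category = 'positive'
--     else:
--         category = 'neutral'
--
--     return emotion_type, category, intensity
-- ===== SOURCE B (Python) =====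
-- # B: one flat priority-ordered keyword table + first-match search (no collect list, no sort).
-- # The table lists (keyword, emotion_type, intensity) grouped by emotion, emotions ordered by
-- # intensity descending (stable w.r.t. the original insertion order), so the FIRST matching
-- # entry is exactly the winner A picks via collect-all + stable descending sort.
-- PRIORITY = (
--     [(k, 'severe_negative', 5) for k in
--      ['suicidal', 'kill myself', 'end it all', 'want to die', 'no point living',
--       'hopeless', 'worthless', 'hate myself', "can't go on", 'give up']] +
--     [(k, 'euphoric', 5) for k in
--      ['ecstatic', 'overjoyed', 'blissful', 'euphoric', 'on top of the world',
--       'never been better', 'incredible', 'phenomenal']] +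
--     [(k, 'high_negative', 4) for k in
--      ['depressed', 'devastated', 'broken', 'shattered', 'destroyed',
--       'overwhelmed', 'panic', 'terrified', 'desperate', 'miserable',
--       'depression', 'feeling depressed', 'i am depressed', 'very sad',
--       'deeply sad', 'extremely sad', "can't cope", 'falling apart']] +
--     [(k, 'high_positive', 4) for k in
--      ['great', 'wonderful', 'fantastic', 'amazing', 'excellent', 'thrilled',
--       'excited', 'joyful', 'elated', 'grateful']] +
--     [(k, 'moderate_negative', 3) for k in
--      ['sad', 'anxious', 'worried', 'stressed', 'upset', 'frustrated',
--       'angry', 'lonely', 'scared', 'nervous', 'tired', 'exhausted',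
--       'cant sleep', "can't sleep", 'cannot sleep', 'insomnia', 'sleepless',
--       'cant fall asleep', "can't fall asleep", 'cannot fall asleep',
--       'trouble sleeping', 'difficulty sleeping', 'sleep problems',
--       'restless night', 'tossing and turning', 'wide awake', 'sleepless night']] +
--     [(k, 'moderate_positive', 3) for k in
--      ['happy', 'glad', 'pleased', 'satisfied', 'cheerful', 'optimistic',
--       'hopeful', 'confident', 'proud', 'feeling happy', 'i am happy', 'really happy']] +
--     [(k, 'mild_negative', 2) for k in
--      ['concerned', 'bothered', 'uncomfortable', 'uneasy', 'restless',
--       'irritated', 'disappointed', 'confused', 'uncertain']] +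
--     [(k, 'mild_positive', 2) for k in
--      ['good', 'better', 'nice', 'pleasant', 'content', 'calm', 'peaceful',
--       'okay today', 'doing well']] +
--     [(k, 'neutral', 1) for k in
--      ['okay', 'fine', 'alright', 'normal', 'average', 'so-so']]
-- )
--
--
-- def detect_emotion_and_intensity(user_query: str):
--     lo = user_query.lower()
--     hit = None
--     if len(user_query.strip().split()) == 1:
--         w = lo.strip()
--         hit = next(((e, i) for k, e, i in PRIORITY if k == w), None)
--     if hit is None:
--         hit = next(((e, i) for k, e, i in PRIORITY if k in lo), None)
--     if hit is None:
--         return 'neutral', 'neutral', 1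
--     etype, inten = hit
--     if 'negative' in etype:
--         category = 'negative'
--     elif 'positive' in etype or etype == 'euphoric':
--         category = 'positive'
--     else:
--         category = 'neutral'
--     return etype, category, inten
-- ===== Notes on version B (the rewrite author's own statement) =====
-- stated objective: alternative
-- what changed: Replaces A's per-emotion collect-every-match-into-a-list followed by a stable descending sort and taking element [0] with a single flat keyword table pre-ordered by priority (intensity descending, stable), so each phase is just a first-match linear search (next(...)) with no match list, no sort and no post-hoc max.
import Mathlib
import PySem

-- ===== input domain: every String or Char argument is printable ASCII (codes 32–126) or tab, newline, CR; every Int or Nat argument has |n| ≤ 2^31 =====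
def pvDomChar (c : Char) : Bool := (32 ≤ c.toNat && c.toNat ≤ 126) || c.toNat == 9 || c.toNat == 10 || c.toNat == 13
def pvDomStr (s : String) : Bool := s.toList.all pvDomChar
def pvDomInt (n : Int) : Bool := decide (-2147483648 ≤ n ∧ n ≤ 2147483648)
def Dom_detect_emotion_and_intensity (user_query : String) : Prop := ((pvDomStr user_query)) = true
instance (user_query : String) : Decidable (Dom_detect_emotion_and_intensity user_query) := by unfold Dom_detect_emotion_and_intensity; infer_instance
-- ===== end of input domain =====

-- B replaces A's collect-all-matches + stable descending sort + take-first with ONE flat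
-- priority-ordered keyword table searched for its FIRST matching entry (no match list, no sort).


-- ===== PORT A =====
-- A's emotions dict, in insertion order: name ↦ (keywords, intensity)
def pvEmotionsA : List (String × List String × Int) :=
  [("severe_negative", (["suicidal", "kill myself", "end it all", "want to die", "no point living",
      "hopeless", "worthless", "hate myself", "can't go on", "give up"], 5)),
   ("high_negative", (["depressed", "devastated", "broken", "shattered", "destroyed",
      "overwhelmed", "panic", "terrified", "desperate", "miserable",
      "depression", "feeling depressed", "i am depressed", "very sad",
      "deeply sad", "extremely sad", "can't cope", "falling apart"], 4)),
   ("moderate_negative", (["sad", "anxious", "worried", "stressed", "upset", "frustrated",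
      "angry", "lonely", "scared", "nervous", "tired", "exhausted",
      "cant sleep", "can't sleep", "cannot sleep", "insomnia", "sleepless",
      "cant fall asleep", "can't fall asleep", "cannot fall asleep",
      "trouble sleeping", "difficulty sleeping", "sleep problems",
      "restless night", "tossing and turning", "wide awake", "sleepless night"], 3)),
   ("mild_negative", (["concerned", "bothered", "uncomfortable", "uneasy", "restless",
      "irritated", "disappointed", "confused", "uncertain"], 2)),
   ("neutral", (["okay", "fine", "alright", "normal", "average", "so-so"], 1)),
   ("mild_positive", (["good", "better", "nice", "pleasant", "content", "calm", "peaceful",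
      "okay today", "doing well"], 2)),
   ("moderate_positive", (["happy", "glad", "pleased", "satisfied", "cheerful", "optimistic",
      "hopeful", "confident", "proud", "feeling happy", "i am happy", "really happy"], 3)),
   ("high_positive", (["great", "wonderful", "fantastic", "amazing", "excellent", "thrilled",
      "excited", "joyful", "elated", "grateful"], 4)),
   ("euphoric", (["ecstatic", "overjoyed", "blissful", "euphoric", "on top of the world",
      "never been better", "incredible", "phenomenal"], 5))]

def detect_emotion_and_intensity (user_query : String) : String × String × Int :=
  let lower := PySem.Str.lower user_query
  -- single-word exact-match pass (priority)
  let detected0 : List (String × Int) :=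
    if (PySem.Str.split₀ (PySem.Str.strip user_query)).length = 1 then
      pvEmotionsA.foldl (fun acc e =>
        if e.2.1.contains (PySem.Str.strip lower) then acc ++ [(e.1, e.2.2)] else acc) []
    else []
  -- substring pass if nothing found
  let detected : List (String × Int) :=
    if detected0 = [] then
      pvEmotionsA.foldl (fun acc e =>
        e.2.1.foldl (fun acc2 kw =>
          if PySem.Str.isIn kw lower then acc2 ++ [(e.1, e.2.2)] else acc2) acc) []
    else detected0
  if detected = [] then ("neutral", "neutral", 1)
  else
    -- stable sort descending by intensity, take the first (detected[0]; list is nonempty here)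
    let sortedL := PySem.List.sorted detected (fun x => x.2) true
    let emotion_type := (sortedL.headD ("", 0)).1
    let intensity := (sortedL.headD ("", 0)).2
    let category :=
      if PySem.Str.isIn "negative" emotion_type then "negative"
      else if PySem.Str.isIn "positive" emotion_type || emotion_type == "euphoric" then "positive"
      else "neutral"
    (emotion_type, category, intensity)

-- ===== PORT B =====
-- Source B's PRIORITY: a single flat (keyword, emotion_type, intensity) table, emotions ordered by
-- intensity descending, stable w.r.t. the original insertion order; first matching entry wins.
def pvPriority : List (String × String × Int) :=
  [("suicidal", "severe_negative", 5), ("kill myself", "severe_negative", 5),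
   ("end it all", "severe_negative", 5), ("want to die", "severe_negative", 5),
   ("no point living", "severe_negative", 5), ("hopeless", "severe_negative", 5),
   ("worthless", "severe_negative", 5), ("hate myself", "severe_negative", 5),
   ("can't go on", "severe_negative", 5), ("give up", "severe_negative", 5),
   ("ecstatic", "euphoric", 5), ("overjoyed", "euphoric", 5), ("blissful", "euphoric", 5),
   ("euphoric", "euphoric", 5), ("on top of the world", "euphoric", 5),
   ("never been better", "euphoric", 5), ("incredible", "euphoric", 5), ("phenomenal", "euphoric", 5),
   ("depressed", "high_negative", 4), ("devastated", "high_negative", 4),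
   ("broken", "high_negative", 4), ("shattered", "high_negative", 4),
   ("destroyed", "high_negative", 4), ("overwhelmed", "high_negative", 4),
   ("panic", "high_negative", 4), ("terrified", "high_negative", 4),
   ("desperate", "high_negative", 4), ("miserable", "high_negative", 4),
   ("depression", "high_negative", 4), ("feeling depressed", "high_negative", 4),
   ("i am depressed", "high_negative", 4), ("very sad", "high_negative", 4),
   ("deeply sad", "high_negative", 4), ("extremely sad", "high_negative", 4),
   ("can't cope", "high_negative", 4), ("falling apart", "high_negative", 4),
   ("great", "high_positive", 4), ("wonderful", "high_positive", 4),
   ("fantastic", "high_positive", 4), ("amazing", "high_positive", 4),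
   ("excellent", "high_positive", 4), ("thrilled", "high_positive", 4),
   ("excited", "high_positive", 4), ("joyful", "high_positive", 4),
   ("elated", "high_positive", 4), ("grateful", "high_positive", 4),
   ("sad", "moderate_negative", 3), ("anxious", "moderate_negative", 3),
   ("worried", "moderate_negative", 3), ("stressed", "moderate_negative", 3),
   ("upset", "moderate_negative", 3), ("frustrated", "moderate_negative", 3),
   ("angry", "moderate_negative", 3), ("lonely", "moderate_negative", 3),
   ("scared", "moderate_negative", 3), ("nervous", "moderate_negative", 3),
   ("tired", "moderate_negative", 3), ("exhausted", "moderate_negative", 3),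
   ("cant sleep", "moderate_negative", 3), ("can't sleep", "moderate_negative", 3),
   ("cannot sleep", "moderate_negative", 3), ("insomnia", "moderate_negative", 3),
   ("sleepless", "moderate_negative", 3), ("cant fall asleep", "moderate_negative", 3),
   ("can't fall asleep", "moderate_negative", 3), ("cannot fall asleep", "moderate_negative", 3),
   ("trouble sleeping", "moderate_negative", 3), ("difficulty sleeping", "moderate_negative", 3),
   ("sleep problems", "moderate_negative", 3), ("restless night", "moderate_negative", 3),
   ("tossing and turning", "moderate_negative", 3), ("wide awake", "moderate_negative", 3),
   ("sleepless night", "moderate_negative", 3),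
   ("happy", "moderate_positive", 3), ("glad", "moderate_positive", 3),
   ("pleased", "moderate_positive", 3), ("satisfied", "moderate_positive", 3),
   ("cheerful", "moderate_positive", 3), ("optimistic", "moderate_positive", 3),
   ("hopeful", "moderate_positive", 3), ("confident", "moderate_positive", 3),
   ("proud", "moderate_positive", 3), ("feeling happy", "moderate_positive", 3),
   ("i am happy", "moderate_positive", 3), ("really happy", "moderate_positive", 3),
   ("concerned", "mild_negative", 2), ("bothered", "mild_negative", 2),
   ("uncomfortable", "mild_negative", 2), ("uneasy", "mild_negative", 2),
   ("restless", "mild_negative", 2), ("irritated", "mild_negative", 2),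
   ("disappointed", "mild_negative", 2), ("confused", "mild_negative", 2),
   ("uncertain", "mild_negative", 2),
   ("good", "mild_positive", 2), ("better", "mild_positive", 2), ("nice", "mild_positive", 2),
   ("pleasant", "mild_positive", 2), ("content", "mild_positive", 2), ("calm", "mild_positive", 2),
   ("peaceful", "mild_positive", 2), ("okay today", "mild_positive", 2), ("doing well", "mild_positive", 2),
   ("okay", "neutral", 1), ("fine", "neutral", 1), ("alright", "neutral", 1),
   ("normal", "neutral", 1), ("average", "neutral", 1), ("so-so", "neutral", 1)]

def detect_emotion_and_intensity_alt (user_query : String) : String × String × Int :=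
  let lo := PySem.Str.lower user_query
  -- phase 1: single word → first entry whose keyword EQUALS the word
  let hit0 : Option (String × Int) :=
    if (PySem.Str.split₀ (PySem.Str.strip user_query)).length = 1 then
      (pvPriority.find? (fun p => p.1 == PySem.Str.strip lo)).map (fun p => p.2)
    else none
  -- phase 2 only if phase 1 found nothing: first entry whose keyword is a SUBSTRING
  let hit : Option (String × Int) :=
    match hit0 with
    | some h => some h
    | none => (pvPriority.find? (fun p => PySem.Str.isIn p.1 lo)).map (fun p => p.2)
  match hit with
  | none => ("neutral", "neutral", 1)
  | some (etype, inten) =>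
    let category :=
      if PySem.Str.isIn "negative" etype then "negative"
      else if PySem.Str.isIn "positive" etype || etype == "euphoric" then "positive"
      else "neutral"
    (etype, category, inten)

-- ===== PRECONDITION & SPEC =====
def Spec_detect_emotion_and_intensity (user_query : String) (out : String × String × Int) : Prop := out = detect_emotion_and_intensity_alt user_query
instance (user_query : String) (out : String × String × Int) : Decidable (Spec_detect_emotion_and_intensity user_query out) := by unfold Spec_detect_emotion_and_intensity; infer_instance

-- ===== CLAIM (what is proved, stated in full; the proofs are below) =====
def Claim_equal_detect_emotion_and_intensity : Prop := ∀ (user_query : String), Dom_detect_emotion_and_intensity user_query → Spec_detect_emotion_and_intensity user_query (detect_emotion_and_intensity user_query)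

-- ===== LEMMAS AND PROOFS =====

-- the max-scan step characterising A's stable descending sort + head: keep the current best,
-- replace only on strictly greater intensity
def fmStep (b : Option (String × Int)) (x : String × Int) : Option (String × Int) :=
  match b with
  | none => some x
  | some p => if p.2 < x.2 then some x else some p

def fm (s : Option (String × Int)) (l : List (String × Int)) : Option (String × Int) :=
  l.foldl fmStep s

theorem pv_fmStep_ne_none (s : Option (String × Int)) (x : String × Int) : fmStep s x ≠ none := by
  cases s <;> simp [fmStep] <;> split_ifs <;> simp

theorem pv_fm_eq_none_iff (l : List (String × Int)) (s : Option (String × Int)) :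
    fm s l = none ↔ s = none ∧ l = [] := by
  induction l generalizing s with
  | nil => simp [fm]
  | cons x l ih =>
    simp only [fm, List.foldl_cons]
    rw [show List.foldl fmStep (fmStep s x) l = fm (fmStep s x) l from rfl, ih]
    simp [pv_fmStep_ne_none]

theorem pv_insertBy_head (before : (String × Int) → (String × Int) → Bool) (x : String × Int)
    (a : List (String × Int)) :
    (PySem.List.insertBy before x a).head? =
      some (match a with | [] => x | y :: _ => if before x y then x else y) := by
  cases a with
  | nil => rfl
  | cons y ys => simp only [PySem.List.insertBy]; split_ifs <;> simp

theorem pv_foldl_insertBy_head (l : List (String × Int)) (acc : List (String × Int)) :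
    (l.foldl (fun acc x => PySem.List.insertBy (fun a b => decide (b.2 < a.2)) x acc) acc).head? =
      l.foldl fmStep acc.head? := by
  induction l generalizing acc with
  | nil => rfl
  | cons x l ih =>
    simp only [List.foldl_cons, ih]
    congr 1
    rw [pv_insertBy_head]
    cases acc with
    | nil => rfl
    | cons y ys => simp only [fmStep, List.head?_cons]; split_ifs <;> simp_all

theorem pv_sorted_head (l : List (String × Int)) :
    (PySem.List.sorted l (fun x => x.2) true).head? = fm none l := by
  rw [PySem.List.sorted_rev_eq_foldl_insertBy]
  simpa using pv_foldl_insertBy_head l []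

theorem pv_fm_filter_map (p : (String × List String × Int) → Bool)
    (f : (String × List String × Int) → String × Int)
    (l : List (String × List String × Int)) (s : Option (String × Int)) :
    fm s ((l.filter p).map f) = l.foldl (fun s e => if p e then fmStep s (f e) else s) s := by
  induction l generalizing s with
  | nil => rfl
  | cons e l ih =>
    by_cases h : p e <;> simp [fm, h] <;> exact ih _

theorem pv_fmStep_idem (s : Option (String × Int)) (x : String × Int) :
    fmStep (fmStep s x) x = fmStep s x := by
  cases s <;> simp [fmStep] <;> split_ifs <;> simp_all

theorem pv_fm_replicate (n : Nat) (s : Option (String × Int)) (x : String × Int) :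
    fm s (List.replicate n x) = if n = 0 then s else fmStep s x := by
  induction n generalizing s with
  | zero => rfl
  | succ n ih =>
    simp only [List.replicate_succ, fm, List.foldl_cons]
    rw [show List.foldl fmStep (fmStep s x) (List.replicate n x) = fm (fmStep s x) (List.replicate n x) from rfl, ih]
    by_cases h : n = 0 <;> simp [h, pv_fmStep_idem]

theorem pv_fm_const_block (kws : List String) (p : String → Bool) (c : String × Int)
    (s : Option (String × Int)) :
    fm s ((kws.filter p).map (fun _ => c)) = if kws.any p then fmStep s c else s := by
  rw [List.map_const', pv_fm_replicate]
  rcases h : kws.any p with _ | _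
  · simp only [Bool.false_eq_true, if_false]
    rw [if_pos]
    simp only [List.length_eq_zero_iff, List.filter_eq_nil_iff]
    intro a ha
    have := List.any_eq_false.mp h a ha
    simp [this]
  · simp only [if_true]
    rw [if_neg]
    obtain ⟨a, ha, hpa⟩ := List.any_eq_true.mp h
    have : a ∈ kws.filter p := List.mem_filter.mpr ⟨ha, hpa⟩
    intro hlen
    rw [List.length_eq_zero_iff] at hlen
    simp [hlen] at this

theorem pv_fm_flatMap (g : (String × List String × Int) → List (String × Int))
    (l : List (String × List String × Int)) (s : Option (String × Int)) :
    fm s (l.flatMap g) = l.foldl (fun s e => fm s (g e)) s := by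
  simp only [fm, List.flatMap, List.foldl_flatten, List.foldl_map]

-- B's emotion table in priority order (stable descending by intensity): name, intensity, keywords
def pvEmotionsP : List (String × Int × List String) :=
  [("severe_negative", (5, ["suicidal", "kill myself", "end it all", "want to die", "no point living",
      "hopeless", "worthless", "hate myself", "can't go on", "give up"])),
   ("euphoric", (5, ["ecstatic", "overjoyed", "blissful", "euphoric", "on top of the world",
      "never been better", "incredible", "phenomenal"])),
   ("high_negative", (4, ["depressed", "devastated", "broken", "shattered", "destroyed",
      "overwhelmed", "panic", "terrified", "desperate", "miserable",
      "depression", "feeling depressed", "i am depressed", "very sad",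
      "deeply sad", "extremely sad", "can't cope", "falling apart"])),
   ("high_positive", (4, ["great", "wonderful", "fantastic", "amazing", "excellent", "thrilled",
      "excited", "joyful", "elated", "grateful"])),
   ("moderate_negative", (3, ["sad", "anxious", "worried", "stressed", "upset", "frustrated",
      "angry", "lonely", "scared", "nervous", "tired", "exhausted",
      "cant sleep", "can't sleep", "cannot sleep", "insomnia", "sleepless",
      "cant fall asleep", "can't fall asleep", "cannot fall asleep",
      "trouble sleeping", "difficulty sleeping", "sleep problems",
      "restless night", "tossing and turning", "wide awake", "sleepless night"])),
   ("moderate_positive", (3, ["happy", "glad", "pleased", "satisfied", "cheerful", "optimistic",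
      "hopeful", "confident", "proud", "feeling happy", "i am happy", "really happy"])),
   ("mild_negative", (2, ["concerned", "bothered", "uncomfortable", "uneasy", "restless",
      "irritated", "disappointed", "confused", "uncertain"])),
   ("mild_positive", (2, ["good", "better", "nice", "pleasant", "content", "calm", "peaceful",
      "okay today", "doing well"])),
   ("neutral", (1, ["okay", "fine", "alright", "normal", "average", "so-so"]))]

theorem pvPriority_eq :
    pvPriority = pvEmotionsP.flatMap (fun e => e.2.2.map (fun k => (k, e.1, e.2.1))) := by rfl

-- find? over the flattened keyword table = find? over the grouped emotion table
theorem pv_find_flat (P : List (String × Int × List String)) (pred : String → Bool) :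
    ((P.flatMap (fun e => e.2.2.map (fun k => (k, e.1, e.2.1)))).find? (fun p => pred p.1)).map (fun p => p.2)
      = (P.find? (fun e => e.2.2.any pred)).map (fun e => (e.1, e.2.1)) := by
  induction P with
  | nil => rfl
  | cons e P ih =>
    have hx : ((e.2.2.map (fun k => (k, e.1, e.2.1))).find? (fun p => pred p.1))
        = (e.2.2.find? pred).map (fun k => (k, e.1, e.2.1)) := by
      rw [List.find?_map]; rfl
    rw [List.flatMap_cons, List.find?_append, hx]
    rcases hk : e.2.2.find? pred with _ | k
    · have ha : e.2.2.any pred = false := by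
        rw [List.any_eq_false]
        intro a haa
        have := List.find?_eq_none.mp hk a haa
        simpa using this
      rw [List.find?_cons_of_neg (by simp [ha])]
      simpa using ih
    · have ha : e.2.2.any pred = true := by
        rw [List.any_eq_true]
        exact ⟨k, List.mem_of_find?_eq_some hk, List.find?_some hk⟩
      rw [List.find?_cons_of_pos (by simp [ha])]
      simp

-- the 9-boolean core: max-scan over A's order = first-hit in priority order
def pvFoldA (bs : List (Bool × String × Int)) : Option (String × Int) :=
  bs.foldl (fun s e => if e.1 then fmStep s e.2 else s) none

def pvFindP (bs : List (Bool × String × Int)) : Option (String × Int) :=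
  (bs.find? (fun e => e.1)).map (fun e => e.2)

theorem pv_core : ∀ (b1 b2 b3 b4 b5 b6 b7 b8 b9 : Bool),
    pvFoldA [(b1, "severe_negative", 5), (b2, "high_negative", 4), (b3, "moderate_negative", 3),
             (b4, "mild_negative", 2), (b5, "neutral", 1), (b6, "mild_positive", 2),
             (b7, "moderate_positive", 3), (b8, "high_positive", 4), (b9, "euphoric", 5)]
      = pvFindP [(b1, "severe_negative", 5), (b9, "euphoric", 5), (b2, "high_negative", 4),
                 (b8, "high_positive", 4), (b3, "moderate_negative", 3), (b7, "moderate_positive", 3),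
                 (b4, "mild_negative", 2), (b6, "mild_positive", 2), (b5, "neutral", 1)] := by
  decide

-- per-emotion boolean form on both sides, tied together through pv_core
theorem pv_master (pred : String → Bool) :
    pvEmotionsA.foldl (fun s e => if e.2.1.any pred then fmStep s (e.1, e.2.2) else s) none
      = (pvEmotionsP.find? (fun e => e.2.2.any pred)).map (fun e => (e.1, e.2.1)) := by
  have hA : pvEmotionsA.foldl (fun s e => if e.2.1.any pred then fmStep s (e.1, e.2.2) else s) none
      = pvFoldA (pvEmotionsA.map (fun e => (e.2.1.any pred, e.1, e.2.2))) := by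
    rw [pvFoldA, List.foldl_map]
  have hP : (pvEmotionsP.find? (fun e => e.2.2.any pred)).map (fun e => (e.1, e.2.1))
      = pvFindP (pvEmotionsP.map (fun e => (e.2.2.any pred, e.1, e.2.1))) := by
    rw [pvFindP, List.find?_map]
    simp [Function.comp_def, Option.map_map]
  rw [hA, hP]
  exact pv_core _ _ _ _ _ _ _ _ _

-- the exact-match pass: fm over A's collected list = B's flat-table first equal keyword
theorem pv_exact_pass (w : String) :
    fm none (pvEmotionsA.foldl (fun acc e =>
        if e.2.1.contains w then acc ++ [(e.1, e.2.2)] else acc) [])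
      = (pvPriority.find? (fun p => p.1 == w)).map (fun p => p.2) := by
  have h1 : List.foldl (fun acc (e : String × List String × Int) =>
      if e.2.1.contains w then acc ++ [(e.1, e.2.2)] else acc) [] pvEmotionsA
      = [] ++ (pvEmotionsA.filter (fun e => e.2.1.contains w)).map (fun e => (e.1, e.2.2)) :=
    PySem.List.foldl_append_if _ _ _ _
  rw [h1, List.nil_append, pv_fm_filter_map]
  have hc : (fun (s : Option (String × Int)) (e : String × List String × Int) =>
      if e.2.1.contains w then fmStep s (e.1, e.2.2) else s)
      = fun s e => if e.2.1.any (fun k => k == w) then fmStep s (e.1, e.2.2) else s := by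
    funext s e
    rw [List.any_beq']
  rw [hc, pv_master (fun k => k == w), pvPriority_eq,
    pv_find_flat pvEmotionsP (fun k => k == w)]

-- the substring pass: fm over A's collected list = B's flat-table first substring keyword
theorem pv_sub_pass (q : String) :
    fm none (pvEmotionsA.foldl (fun acc e =>
        e.2.1.foldl (fun acc2 kw =>
          if PySem.Str.isIn kw q then acc2 ++ [(e.1, e.2.2)] else acc2) acc) [])
      = (pvPriority.find? (fun p => PySem.Str.isIn p.1 q)).map (fun p => p.2) := by
  have hinner : (fun (acc : List (String × Int)) (e : String × List String × Int) =>
      e.2.1.foldl (fun acc2 kw => if PySem.Str.isIn kw q then acc2 ++ [(e.1, e.2.2)] else acc2) acc)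
      = fun acc e => acc ++ (e.2.1.filter (fun kw => PySem.Str.isIn kw q)).map (fun _ => (e.1, e.2.2)) := by
    funext acc e
    exact PySem.List.foldl_append_if (fun kw => PySem.Str.isIn kw q) (fun _ => (e.1, e.2.2)) e.2.1 acc
  rw [hinner, PySem.List.foldl_append_eq_flatMap, List.nil_append, pv_fm_flatMap]
  have hfold : (fun (s : Option (String × Int)) (e : String × List String × Int) =>
      fm s ((e.2.1.filter (fun kw => PySem.Str.isIn kw q)).map (fun _ => (e.1, e.2.2))))
      = fun s e => if e.2.1.any (fun kw => PySem.Str.isIn kw q) then fmStep s (e.1, e.2.2) else s := by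
    funext s e
    rw [pv_fm_const_block]
  rw [hfold, pv_master (fun kw => PySem.Str.isIn kw q), pvPriority_eq,
    pv_find_flat pvEmotionsP (fun kw => PySem.Str.isIn kw q)]

-- A's tail (nonempty test, sort, head, categorise) as a function of fm over the detected list
theorem pv_final (l : List (String × Int)) :
    (if l = [] then (("neutral", "neutral", 1) : String × String × Int)
     else
       let sortedL := PySem.List.sorted l (fun x => x.2) true
       let emotion_type := (sortedL.headD ("", 0)).1
       let intensity := (sortedL.headD ("", 0)).2
       let category :=
         if PySem.Str.isIn "negative" emotion_type then "negative"
         else if PySem.Str.isIn "positive" emotion_type || emotion_type == "euphoric" then "positive"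
         else "neutral"
       (emotion_type, category, intensity))
    = (match fm none l with
       | none => (("neutral", "neutral", 1) : String × String × Int)
       | some (emotion_type, inten) =>
         let category :=
           if PySem.Str.isIn "negative" emotion_type then "negative"
           else if PySem.Str.isIn "positive" emotion_type || emotion_type == "euphoric" then "positive"
           else "neutral"
         (emotion_type, category, inten)) := by
  rcases h : fm none l with _ | ⟨t, i⟩
  · rw [(pv_fm_eq_none_iff l none).mp h |>.2]
    rfl
  · have hne : l ≠ [] := by
      intro hl; rw [hl] at h; simp [fm] at h
    rw [if_neg hne]
    have hh : (PySem.List.sorted l (fun x => x.2) true).head? = some (t, i) := by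
      rw [pv_sorted_head, h]
    simp only [List.headD_eq_head?_getD, hh, Option.getD_some]


-- the common categorise tail, A's match against B's match (phase-1 result hv, phase-2 value u)
theorem pv_tail_none (o u : Option (String × Int)) (h : o = u) :
    (match o with
     | none => (("neutral", "neutral", 1) : String × String × Int)
     | some (emotion_type, inten) =>
       let category :=
         if PySem.Str.isIn "negative" emotion_type then "negative"
         else if PySem.Str.isIn "positive" emotion_type || emotion_type == "euphoric" then "positive"
         else "neutral"
       (emotion_type, category, inten))
    = (match (match (none : Option (String × Int)) with | some h => some h | none => u) with
       | none => (("neutral", "neutral", 1) : String × String × Int)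
       | some (etype, inten) =>
         let category :=
           if PySem.Str.isIn "negative" etype then "negative"
           else if PySem.Str.isIn "positive" etype || etype == "euphoric" then "positive"
           else "neutral"
         (etype, category, inten)) := by
  subst h
  rcases o with _ | ⟨t, i⟩ <;> rfl

-- ===== VERDICT (by name: the statement is the Claim_ definition above) =====
theorem detect_emotion_and_intensity_spec : Claim_equal_detect_emotion_and_intensity := by
  intro s _
  unfold Spec_detect_emotion_and_intensity
  simp only [detect_emotion_and_intensity, detect_emotion_and_intensity_alt]
  by_cases hc : (PySem.Str.split₀ (PySem.Str.strip s)).length = 1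
  · rw [if_pos hc, if_pos hc]
    rcases hfm : fm none (pvEmotionsA.foldl (fun acc e =>
        if e.2.1.contains (PySem.Str.strip (PySem.Str.lower s)) then acc ++ [(e.1, e.2.2)] else acc)
        ([] : List (String × Int))) with _ | ⟨t, i⟩
    · -- exact pass found nothing: both fall through to the substring pass
      have h0 := ((pv_fm_eq_none_iff _ _).mp hfm).2
      have hB : (pvPriority.find? (fun p => p.1 == PySem.Str.strip (PySem.Str.lower s))).map
          (fun p => p.2) = none := by rw [← pv_exact_pass, hfm]
      rw [h0, hB, if_pos (Eq.refl ([] : List (String × Int))), pv_final]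
      exact pv_tail_none _ _ (pv_sub_pass _)
    · -- exact pass found a winner: both stop there
      have hne : (pvEmotionsA.foldl (fun acc e =>
          if e.2.1.contains (PySem.Str.strip (PySem.Str.lower s)) then acc ++ [(e.1, e.2.2)] else acc)
          ([] : List (String × Int))) ≠ [] := by
        intro hl; rw [hl] at hfm; simp [fm] at hfm
      have hB : (pvPriority.find? (fun p => p.1 == PySem.Str.strip (PySem.Str.lower s))).map
          (fun p => p.2) = some (t, i) := by rw [← pv_exact_pass, hfm]
      have hA := pv_final (pvEmotionsA.foldl (fun acc e =>
          if e.2.1.contains (PySem.Str.strip (PySem.Str.lower s)) then acc ++ [(e.1, e.2.2)] else acc)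
          ([] : List (String × Int)))
      rw [hfm] at hA
      rw [if_neg hne, if_neg hne, hB]
      rw [if_neg hne] at hA
      exact hA.trans (by rfl)
  · rw [if_neg hc, if_neg hc, if_pos (Eq.refl ([] : List (String × Int))), pv_final]
    exact pv_tail_none _ _ (pv_sub_pass _)
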